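-- pv_equiv track=rewrite | github.com/MaheshbabuReddy/Python-Practice | AllModule/Python/10modl.py | translate_to_ancient_language
-- ===== SOURCE A (Python) =====
-- def translate_to_ancient_language(sentence):
--     def reverse_consonants(word):
--         vowels = "aeiou"
--         consonants = ""
--         for letter in word:
--             if letter not in vowels:
--                 consonants += letter
--         reversed_consonants = consonants[::-1]
--         ancient_word = ""
--         i = 0
--         for letter in word:
--             if letter in vowels:
--                 ancient_word += letter
--             else:
--                 ancient_word += reversed_consonants[i]
--                 i += 1
--         return ancient_word
--
--     translated_sentence = []
--     words = sentence.split()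
--     for word in words:
--         translated_word = reverse_consonants(word)
--         translated_sentence.append(translated_word)
--
--     return " ".join(translated_sentence)
-- ===== SOURCE B (Python) =====
-- def translate_to_ancient_language(sentence):
--     vowels = set("aeiou")
--
--     def reverse_consonants(word):
--         chars = list(word)
--         i, j = 0, len(chars) - 1
--         while i < j:
--             if chars[i] in vowels:
--                 i += 1
--             elif chars[j] in vowels:
--                 j -= 1
--             else:
--                 chars[i], chars[j] = chars[j], chars[i]
--                 i += 1
--                 j -= 1
--         return "".join(chars)
--
--     return " ".join(reverse_consonants(w) for w in sentence.split())
-- ===== Notes on version B (the rewrite author's own statement) =====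
-- stated objective: alternative
-- what changed: Per word, instead of extracting the consonant string, reversing it and re-merging with a running index, B reverses the consonants in place with the classic two-pointer swap (i from the left skipping vowels, j from the right skipping vowels, swap when both sit on consonants); the outer split/join structure is unchanged.
import Mathlib
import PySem

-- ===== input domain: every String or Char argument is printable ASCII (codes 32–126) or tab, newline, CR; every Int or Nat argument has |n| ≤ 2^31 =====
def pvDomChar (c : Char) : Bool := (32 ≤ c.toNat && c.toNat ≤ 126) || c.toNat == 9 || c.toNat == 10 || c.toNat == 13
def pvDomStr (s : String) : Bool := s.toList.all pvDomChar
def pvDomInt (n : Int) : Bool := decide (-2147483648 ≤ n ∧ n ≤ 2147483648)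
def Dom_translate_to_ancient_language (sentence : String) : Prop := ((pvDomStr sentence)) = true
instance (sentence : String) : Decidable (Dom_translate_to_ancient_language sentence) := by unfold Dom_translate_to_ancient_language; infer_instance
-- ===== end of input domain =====

-- B replaces A's extract-reverse-and-remerge of each word's consonants by an in-place
-- two-pointer swap over the word's characters (objective: alternative, same cost).

-- ===== PORT A =====
-- per-word helper of A: collect the consonants, reverse them, re-emit the word with
-- vowels in place and consonants taken in order from the reversed string.
-- 'letter in vowels' for a single character is character membership in "aeiou" (exact).
def pvRevConsA (word : List Char) : List Char :=
  let consonants := word.foldl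
    (fun acc letter => if ("aeiou".toList.contains letter) then acc else acc ++ [letter]) []
  -- consonants[::-1]; slice? with step -1 never returns none, so .getD [] is exact
  let reversed := (PySem.List.slice? consonants none none (-1)).getD []
  -- reversed_consonants[i] is always in range (i counts consonants seen so far), so .getD ' ' is exact
  let r := word.foldl
    (fun (s : List Char × Int) letter =>
      if ("aeiou".toList.contains letter) then (s.1 ++ [letter], s.2)
      else (s.1 ++ [(PySem.List.pyGet? reversed s.2).getD ' '], s.2 + 1)) ([], (0 : Int))
  r.1

def translate_to_ancient_language (sentence : String) : String :=
  let words := PySem.Chars.split₀ sentence.toList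
  let translated := words.foldl (fun acc w => acc ++ [pvRevConsA w]) ([] : List (List Char))
  String.ofList (PySem.Chars.join [' '] translated)

-- ===== PORT B =====
def pvVowelsB : PySem.Set Char := PySem.Set.ofList "aeiou".toList

-- B's while-loop: two pointers i, j; chars[i]/chars[j] are always in range while the loop
-- runs (0 ≤ i < j < len), so .getD ' ' and .toNat on the assignment indices are exact.
def pvTp (cs : List Char) (i j : Int) : List Char :=
  if h : i < j then
    if pvVowelsB.contains ((PySem.List.pyGet? cs i).getD ' ') then pvTp cs (i + 1) j
    else if pvVowelsB.contains ((PySem.List.pyGet? cs j).getD ' ') then pvTp cs i (j - 1)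
    else
      let ci := (PySem.List.pyGet? cs i).getD ' '
      let cj := (PySem.List.pyGet? cs j).getD ' '
      pvTp ((cs.set i.toNat cj).set j.toNat ci) (i + 1) (j - 1)
  else cs
termination_by (j - i).toNat
decreasing_by all_goals omega

def pvRevConsB (word : List Char) : List Char := pvTp word 0 ((word.length : Int) - 1)

def translate_to_ancient_language_alt (sentence : String) : String :=
  String.ofList (PySem.Chars.join [' '] ((PySem.Chars.split₀ sentence.toList).map pvRevConsB))

-- ===== PRECONDITION & SPEC =====
def Spec_translate_to_ancient_language (sentence : String) (out : String) : Prop := out = translate_to_ancient_language_alt sentence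
instance (sentence : String) (out : String) : Decidable (Spec_translate_to_ancient_language sentence out) := by unfold Spec_translate_to_ancient_language; infer_instance

-- ===== CLAIM (what is proved, stated in full; the proofs are below) =====
def Claim_equal_translate_to_ancient_language : Prop := ∀ (sentence : String), Dom_translate_to_ancient_language sentence → Spec_translate_to_ancient_language sentence (translate_to_ancient_language sentence)

-- ===== LEMMAS AND PROOFS =====

def isV (c : Char) : Bool := "aeiou".toList.contains c

-- common specification: emit vowels in place, consonants from the supply r in order
def pvInter : List Char → List Char → List Char
  | [], _ => []
  | c :: t, r => if isV c then c :: pvInter t r else r.headD ' ' :: pvInter t r.tail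

theorem pvVowelsB_contains (c : Char) : pvVowelsB.contains c = isV c := by rfl

-- ---- A side ----

theorem interA (t : List Char) (rev : List Char) :
    ∀ (i : Nat) (acc : List Char),
    (t.foldl (fun (s : List Char × Int) letter =>
        if ("aeiou".toList.contains letter) then (s.1 ++ [letter], s.2)
        else (s.1 ++ [(PySem.List.pyGet? rev s.2).getD ' '], s.2 + 1)) (acc, (i : Int))).1
      = acc ++ pvInter t (rev.drop i) := by
  induction t with
  | nil => intro i acc; simp [pvInter]
  | cons c t ih =>
    intro i acc
    simp only [List.foldl_cons]
    by_cases h : isV c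
    · rw [if_pos (show ("aeiou".toList.contains c) = true from h)]
      rw [ih i (acc ++ [c])]
      simp [pvInter, h]
    · rw [if_neg (show ¬ ("aeiou".toList.contains c) = true from h)]
      have hget : (PySem.List.pyGet? rev (i : Int)).getD ' ' = (rev.drop i).headD ' ' := by
        rw [PySem.List.pyGet?_natCast]
        simp [List.head?_drop]
      have htail : rev.drop (i + 1) = (rev.drop i).tail := by
        simp [List.tail_drop]
      have hcast : ((i : Int) + 1) = ((i + 1 : Nat) : Int) := by push_cast; ring
      rw [hcast, ih (i + 1) (acc ++ [(PySem.List.pyGet? rev (i : Int)).getD ' '])]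
      simp only [pvInter]
      rw [if_neg h, ← hget, ← htail, List.append_assoc, List.singleton_append]

theorem revConsA_eq_inter (word : List Char) :
    pvRevConsA word = pvInter word ((word.filter (fun c => !isV c)).reverse) := by
  unfold pvRevConsA
  dsimp only
  have hcons : word.foldl
      (fun acc letter => if ("aeiou".toList.contains letter) then acc else acc ++ [letter]) []
      = word.filter (fun c => !isV c) := by
    have : ∀ (acc : List Char), word.foldl
        (fun acc letter => if ("aeiou".toList.contains letter) then acc else acc ++ [letter]) acc
        = word.foldl (fun acc letter => if (!isV letter) then acc ++ [letter] else acc) acc := by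
      intro acc
      apply PySem.List.foldl_congr_mem
      intro a x _
      simp only [isV]
      by_cases hc : "aeiou".toList.contains x = true
      · rw [if_pos hc, if_neg (by simp at hc ⊢; tauto)]
      · rw [if_neg hc, if_pos (by simp at hc ⊢; tauto)]
    rw [this, PySem.List.foldl_append_if_eq_filter]
    simp
  rw [hcons, PySem.List.slice?_none_none_neg_one]
  simp only [Option.getD_some]
  simpa using interA word (word.filter (fun c => !isV c)).reverse 0 []

-- ---- B side ----

-- recursive rendition of the two-pointer pass on the segment between the pointers
def pvGo (seg : List Char) : List Char :=
  match seg with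
  | [] => []
  | c :: rest =>
    if _h : rest.length = 0 then [c]
    else if isV c then c :: pvGo rest
    else
      let last := rest.getLast?.getD ' '
      let mid := rest.dropLast
      if isV last then pvGo (c :: mid) ++ [last]
      else last :: pvGo mid ++ [c]
termination_by seg.length
decreasing_by all_goals (simp [List.length_dropLast]; try omega)

theorem inter_append_vowel (u : List Char) (x : Char) (hx : isV x = true) :
    ∀ (r : List Char), pvInter (u ++ [x]) r = pvInter u r ++ [x] := by
  induction u with
  | nil => intro r; simp [pvInter, hx]
  | cons c u ih =>
    intro r
    by_cases h : isV c <;> simp [pvInter, h, ih]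

theorem inter_append_cons (u : List Char) (x z : Char) (hx : isV x = false) :
    ∀ (r : List Char), r.length = (u.filter (fun c => !isV c)).length →
    pvInter (u ++ [x]) (r ++ [z]) = pvInter u r ++ [z] := by
  induction u with
  | nil =>
    intro r hr
    simp at hr
    subst hr
    simp [pvInter, hx]
  | cons c u ih =>
    intro r hr
    by_cases h : isV c
    · simp [pvInter, h]
      exact ih r (by simpa [h] using hr)
    · have hne : r ≠ [] := by
        intro he; subst he; simp [h] at hr
      obtain ⟨rh, rt, rfl⟩ := List.exists_cons_of_ne_nil hne
      simp [pvInter, h]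
      exact ih rt (by simpa [h] using hr)

theorem pvGo_single (c : Char) : pvGo [c] = [c] := by
  simp [pvGo]

theorem pvGo_cons_vowel (c : Char) (m : List Char) (d : Char) (hc : isV c = true) :
    pvGo (c :: (m ++ [d])) = c :: pvGo (m ++ [d]) := by
  rw [pvGo]
  rw [dif_neg (by simp)]
  simp [hc]

theorem pvGo_cons_lastV (c : Char) (m : List Char) (d : Char) (hc : isV c = false)
    (hd : isV d = true) : pvGo (c :: (m ++ [d])) = pvGo (c :: m) ++ [d] := by
  rw [pvGo]
  rw [dif_neg (by simp)]
  simp [hc, hd]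

theorem pvGo_cons_cons (c : Char) (m : List Char) (d : Char) (hc : isV c = false)
    (hd : isV d = false) : pvGo (c :: (m ++ [d])) = d :: pvGo m ++ [c] := by
  rw [pvGo]
  rw [dif_neg (by simp)]
  simp [hc, hd]

theorem go_eq_inter : ∀ (n : Nat) (seg : List Char), seg.length ≤ n →
    pvGo seg = pvInter seg ((seg.filter (fun c => !isV c)).reverse) := by
  intro n
  induction n with
  | zero =>
    intro seg hle
    have h0 : seg = [] := List.length_eq_zero_iff.mp (Nat.le_zero.mp hle)
    subst h0
    simp [pvGo, pvInter]
  | succ n ih =>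
    intro seg hle
    match seg with
    | [] => simp [pvGo, pvInter]
    | c :: rest =>
      rcases List.eq_nil_or_concat rest with rfl | ⟨m, d, rfl⟩
      · cases hc : isV c <;> simp [pvGo_single, pvInter, hc]
      · simp only [List.concat_eq_append] at hle ⊢
        have hmn : m.length + 1 ≤ n := by simp at hle; omega
        by_cases hc : isV c
        · rw [pvGo_cons_vowel c m d hc, ih (m ++ [d]) (by simpa using hmn)]
          simp [pvInter, hc]
        · have hc' : isV c = false := by simp [hc]
          by_cases hd : isV d
          · rw [pvGo_cons_lastV c m d hc' hd]
            have hfil : (c :: (m ++ [d])).filter (fun x => !isV x)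
                = ((c :: m).filter (fun x => !isV x)) := by
              simp [List.filter_append, hc', hd]
            show pvGo (c :: m) ++ [d]
                = pvInter ((c :: m) ++ [d]) (((c :: (m ++ [d])).filter (fun x => !isV x)).reverse)
            rw [hfil, inter_append_vowel (c :: m) d hd, ih (c :: m) hmn]
          · have hd' : isV d = false := by simp [hd]
            rw [pvGo_cons_cons c m d hc' hd']
            have hfil : ((c :: (m ++ [d])).filter (fun x => !isV x)).reverse
                = d :: ((m.filter (fun x => !isV x)).reverse ++ [c]) := by
              simp [List.filter_append, hc', hd']
            rw [hfil]
            show d :: pvGo m ++ [c]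
                = pvInter (c :: (m ++ [d])) (d :: ((m.filter (fun x => !isV x)).reverse ++ [c]))
            simp only [pvInter]
            rw [if_neg (by simp [hc'])]
            simp only [List.headD_cons, List.tail_cons]
            rw [inter_append_cons m d c hd' (m.filter (fun x => !isV x)).reverse (by simp)]
            rw [ih m (by omega)]
            simp

theorem tp_eq_go : ∀ (n : Nat) (seg pre suf : List Char), seg.length ≤ n →
    pvTp (pre ++ seg ++ suf) (pre.length : Int) ((pre.length : Int) + seg.length - 1)
      = pre ++ pvGo seg ++ suf := by
  intro n
  induction n with
  | zero =>
    intro seg pre suf hle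
    have h0 : seg = [] := List.length_eq_zero_iff.mp (Nat.le_zero.mp hle)
    subst h0
    rw [pvTp, dif_neg (by simp)]
    simp [pvGo]
  | succ n ih =>
    intro seg pre suf hle
    match seg with
    | [] =>
      rw [pvTp, dif_neg (by simp)]
      simp [pvGo]
    | c :: rest =>
      rcases List.eq_nil_or_concat rest with rfl | ⟨m, d, hrest⟩
      · rw [pvTp, dif_neg (by simp)]
        simp [pvGo_single]
      · rw [List.concat_eq_append] at hrest
        subst hrest
        simp only [List.length_cons, List.length_append, List.length_cons,
          List.length_nil] at hle ⊢
        have hj : ((pre.length : Int) + ((m.length + 0 + 1 : Nat) + 1 : Nat) - 1)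
            = ((pre.length + m.length + 1 : Nat) : Int) := by push_cast; ring
        rw [hj, pvTp, dif_pos (by push_cast; omega)]
        rw [PySem.List.pyGet?_natCast, PySem.List.pyGet?_natCast]
        have hgi : (pre ++ (c :: (m ++ [d])) ++ suf)[pre.length]? = some c := by
          rw [List.getElem?_append_left (by simp),
              List.getElem?_append_right (le_refl pre.length)]
          simp
        have hgj : (pre ++ (c :: (m ++ [d])) ++ suf)[pre.length + m.length + 1]? = some d := by
          rw [List.getElem?_append_left (by simp <;> omega),
              List.getElem?_append_right (by omega)]
          have h1 : pre.length + m.length + 1 - pre.length = m.length + 1 := by omega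
          rw [h1]
          have h2 : (c :: (m ++ [d]))[m.length + 1]? = (m ++ [d])[m.length]? := rfl
          rw [h2, List.getElem?_concat_length]
        rw [hgi, hgj]
        simp only [Option.getD_some, pvVowelsB_contains]
        by_cases hc : isV c
        · rw [if_pos hc]
          have e1 : pre ++ (c :: (m ++ [d])) ++ suf = (pre ++ [c]) ++ (m ++ [d]) ++ suf := by
            simp
          have e2 : (pre.length : Int) + 1 = (((pre ++ [c]).length : Nat) : Int) := by
            simp <;> omega
          have e3 : ((pre.length + m.length + 1 : Nat) : Int)
              = (((pre ++ [c]).length : Nat) : Int) + (((m ++ [d]).length : Nat) : Int) - 1 := by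
            simp <;> omega
          rw [e1, e2, e3, ih (m ++ [d]) (pre ++ [c]) suf (by simp <;> omega)]
          rw [pvGo_cons_vowel c m d hc]
          simp
        · have hc' : isV c = false := by simp [hc]
          rw [if_neg (by simp [hc'])]
          by_cases hd : isV d
          · rw [if_pos hd]
            have e1 : pre ++ (c :: (m ++ [d])) ++ suf = pre ++ (c :: m) ++ (d :: suf) := by
              simp
            have e3 : ((pre.length + m.length + 1 : Nat) : Int) - 1
                = (pre.length : Int) + (((c :: m).length : Nat) : Int) - 1 := by
              simp <;> omega
            rw [e1, e3, ih (c :: m) pre (d :: suf) (by simp <;> omega)]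
            rw [pvGo_cons_lastV c m d hc' hd]
            simp
          · have hd' : isV d = false := by simp [hd]
            rw [if_neg (by simp [hd'])]
            have hset : (((pre ++ (c :: (m ++ [d])) ++ suf).set ((pre.length : Int)).toNat d).set
                (((pre.length + m.length + 1 : Nat) : Int)).toNat c)
                = (pre ++ [d]) ++ m ++ ([c] ++ suf) := by
              have t1 : ((pre.length : Int)).toNat = pre.length := by omega
              have t2 : (((pre.length + m.length + 1 : Nat) : Int)).toNat
                  = pre.length + m.length + 1 := by omega
              rw [t1, t2]
              have s1 : pre ++ (c :: (m ++ [d])) ++ suf = pre ++ c :: (m ++ [d] ++ suf) := by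
                simp
              rw [s1]
              have s2 : (pre ++ c :: (m ++ [d] ++ suf)).set pre.length d
                  = pre ++ d :: (m ++ [d] ++ suf) := by simp
              rw [s2]
              have s3 : pre ++ d :: (m ++ [d] ++ suf) = (pre ++ d :: m) ++ d :: suf := by simp
              rw [s3]
              have s4 : pre.length + m.length + 1 = (pre ++ d :: m).length := by simp <;> omega
              rw [s4]
              have s5 : ((pre ++ d :: m) ++ d :: suf).set (pre ++ d :: m).length c
                  = (pre ++ d :: m) ++ c :: suf := by simp
              rw [s5]
              simp
            rw [hset]
            have e2 : (pre.length : Int) + 1 = (((pre ++ [d]).length : Nat) : Int) := by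
              simp <;> omega
            have e3 : ((pre.length + m.length + 1 : Nat) : Int) - 1
                = (((pre ++ [d]).length : Nat) : Int) + ((m.length : Nat) : Int) - 1 := by
              simp <;> omega
            rw [e2, e3, ih m (pre ++ [d]) ([c] ++ suf) (by omega)]
            rw [pvGo_cons_cons c m d hc' hd']
            simp

theorem revConsB_eq_inter (word : List Char) :
    pvRevConsB word = pvInter word ((word.filter (fun c => !isV c)).reverse) := by
  have h := tp_eq_go word.length word [] [] le_rfl
  simp at h
  unfold pvRevConsB
  have : ((word.length : Int) - 1) = (0 : Int) + word.length - 1 := by ring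
  rw [this]
  rw [show ((0 : Int)) = (([] : List Char).length : Int) by simp] at *
  simpa using h.trans (go_eq_inter word.length word le_rfl)

-- ---- top level ----

theorem revCons_eq (word : List Char) : pvRevConsA word = pvRevConsB word := by
  rw [revConsA_eq_inter, revConsB_eq_inter]

-- ===== VERDICT (by name: the statement is the Claim_ definition above) =====
theorem translate_to_ancient_language_spec : Claim_equal_translate_to_ancient_language := by
  intro sentence _
  unfold Spec_translate_to_ancient_language translate_to_ancient_language translate_to_ancient_language_alt
  dsimp only
  rw [PySem.List.foldl_append_singleton_eq_map]
  simp [funext revCons_eq]
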